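-- pv_equiv track=rewrite | github.com/yunhwaa/Baekjoon | 프로그래머스/0/120835. 진료 순서 정하기/진료 순서 정하기.py | solution
-- ===== SOURCE A (Python) =====
-- def solution(emergency):
--     answer = [0] * len(emergency)
--     em = emergency
--     em = sorted(em, reverse=True)
--     for i in range(len(em)):
--         for e in range(len(emergency)):
--             if em[i] == emergency[e]:
--                 answer[e] = i + 1
--     return answer
-- ===== SOURCE B (Python) =====
-- def solution(emergency):
--     rank = {v: i + 1 for i, v in enumerate(sorted(emergency, reverse=True))}
--     return [rank[v] for v in emergency]
-- ===== Notes on version B (the rewrite author's own statement) =====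
-- stated objective: faster
-- what changed: Replaces the nested O(n^2) scan (for each sorted value, rescan the whole input) with one descending sort, a single dict comprehension value->rank (later duplicates overwrite, matching A's last-write), and one lookup pass.
import Mathlib
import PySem

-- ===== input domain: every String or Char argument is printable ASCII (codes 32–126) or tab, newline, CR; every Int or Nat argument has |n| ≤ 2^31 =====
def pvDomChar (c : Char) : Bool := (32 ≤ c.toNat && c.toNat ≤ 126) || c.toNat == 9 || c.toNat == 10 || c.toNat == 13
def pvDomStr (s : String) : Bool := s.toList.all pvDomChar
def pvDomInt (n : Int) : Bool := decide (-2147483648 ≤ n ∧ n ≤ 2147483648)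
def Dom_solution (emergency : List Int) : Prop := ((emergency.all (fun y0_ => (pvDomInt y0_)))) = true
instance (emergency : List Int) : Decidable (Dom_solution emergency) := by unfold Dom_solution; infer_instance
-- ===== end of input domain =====

-- B replaces A's nested O(n^2) rescans with one sort + a value→rank dict + one lookup pass (faster).

-- ===== PORT A =====
-- literal transliteration of A: answer = [0]*n; em = sorted(emergency, reverse=True);
-- nested index loops; answer[e] = i+1 on match.  Loop indices from range are always
-- in bounds and nonnegative, so '.set e.toNat' is exact here.
def solution (emergency : List Int) : List Int :=
  let answer := List.replicate emergency.length (0 : Int)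
  let em := PySem.List.sorted emergency (fun x => x) true
  (PySem.List.pyRange 0 (em.length : Int) 1).foldl
    (fun ans i =>
      (PySem.List.pyRange 0 (emergency.length : Int) 1).foldl
        (fun a e =>
          if PySem.List.pyGetD em i 0 = PySem.List.pyGetD emergency e 0 then
            a.set e.toNat (i + 1)
          else a)
        ans)
    answer

-- ===== PORT B =====
-- transliteration of Source B: rank = {v: i+1 for i, v in enumerate(sorted(emergency, reverse=True))};
-- return [rank[v] for v in emergency].  'rank[v]' never raises (every v of emergency is a key
-- of rank), so 'getD v 0' is exact.
def solution_alt (emergency : List Int) : List Int :=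
  let em := PySem.List.sorted emergency (fun x => x) true
  let rank := (PySem.List.enumerate em 0).foldl
    (fun d p => d.insert p.2 (p.1 + 1)) (PySem.Dict.empty : PySem.Dict Int Int)
  emergency.map (fun v => rank.getD v 0)

-- ===== PRECONDITION & SPEC =====
def Spec_solution (emergency : List Int) (out : List Int) : Prop := out = solution_alt emergency
instance (emergency : List Int) (out : List Int) : Decidable (Spec_solution emergency out) := by unfold Spec_solution; infer_instance

-- ===== CLAIM (what is proved, stated in full; the proofs are below) =====
def Claim_equal_solution : Prop := ∀ (emergency : List Int), Dom_solution emergency → Spec_solution emergency (solution emergency)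

-- ===== LEMMAS AND PROOFS =====

-- pulling a fixed head through the index-shifted assignment loop
lemma shift_fold (v r : Int) (t : List Int) (idxs : List Nat) (z : Int) (acc : List Int) :
    idxs.foldl (fun a e => if v = t.getD e 0 then a.set (e + 1) r else a) (z :: acc)
      = z :: idxs.foldl (fun a e => if v = t.getD e 0 then a.set e r else a) acc := by
  induction idxs generalizing acc with
  | nil => rfl
  | cons e es ih =>
    simp only [List.foldl_cons]
    split_ifs with h
    · rw [List.set_cons_succ, ih]
    · rw [ih]

-- one pass of A's inner loop updates a map-shaped answer pointwise
lemma inner_map (v r : Int) (xs : List Int) (g : Int → Int) :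
    (List.range xs.length).foldl (fun a e => if v = xs.getD e 0 then a.set e r else a) (xs.map g)
      = xs.map (fun x => if v = x then r else g x) := by
  induction xs generalizing g with
  | nil => rfl
  | cons y t ih =>
    rw [List.length_cons, List.range_succ_eq_map, List.foldl_cons, List.foldl_map]
    simp only [Nat.succ_eq_add_one]
    simp only [List.map_cons, List.getD_cons_zero, List.getD_cons_succ, List.set_cons_zero]
    split_ifs with h
    · rw [shift_fold, ih]
    · rw [shift_fold, ih]

-- combined invariant: A's fold over (index, value) pairs keeps the answer equal to
-- emergency mapped through the lookup in B's growing dict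
lemma both_folds (emergency : List Int) (ps : List (Int × Int)) (g : Int → Int)
    (d : PySem.Dict Int Int) (hd : ∀ x, d.getD x 0 = g x) :
    ps.foldl (fun ans p => (List.range emergency.length).foldl
        (fun a e => if p.2 = emergency.getD e 0 then a.set e (p.1 + 1) else a) ans)
      (emergency.map g)
      = emergency.map (fun x => (ps.foldl (fun d p => d.insert p.2 (p.1 + 1)) d).getD x 0) := by
  induction ps generalizing g d with
  | nil =>
    simp only [List.foldl_nil]
    exact List.map_congr_left (fun x _ => (hd x).symm)
  | cons p ps ih =>
    simp only [List.foldl_cons]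
    rw [inner_map p.2 (p.1 + 1) emergency g]
    refine ih (fun x => if p.2 = x then p.1 + 1 else g x) (d.insert p.2 (p.1 + 1)) ?_
    intro x
    rw [PySem.Dict.getD_insert]
    by_cases h : x = p.2
    · simp [h]
    · simp [h, Ne.symm h, hd x]

-- ===== VERDICT (by name: the statement is the Claim_ definition above) =====
theorem solution_spec : Claim_equal_solution := by
  intro emergency _
  unfold Spec_solution solution solution_alt
  simp only []
  set em := PySem.List.sorted emergency (fun x => x) true with hem
  -- rewrite A's outer index loop as a fold over enumerate em
  rw [show ((em.length : Int)) = PySem.List.len em from rfl]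
  rw [show (PySem.List.pyRange 0 (PySem.List.len em) 1).foldl
        (fun ans i =>
          (PySem.List.pyRange 0 (emergency.length : Int) 1).foldl
            (fun a e =>
              if PySem.List.pyGetD em i 0 = PySem.List.pyGetD emergency e 0 then
                a.set e.toNat (i + 1)
              else a) ans)
        (List.replicate emergency.length (0 : Int))
      = (PySem.List.enumerate em 0).foldl
        (fun ans p =>
          (PySem.List.pyRange 0 (emergency.length : Int) 1).foldl
            (fun a e =>
              if p.2 = PySem.List.pyGetD emergency e 0 then a.set e.toNat (p.1 + 1) else a) ans)
        (List.replicate emergency.length (0 : Int))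
      from by rw [PySem.List.enumerate_eq_map_pyRange (d := 0), List.foldl_map]]
  -- rewrite the inner Int-index loop as a Nat-index loop over List.range
  simp only [PySem.List.pyRange_zero_nat, List.foldl_map, PySem.List.pyGetD_natCast,
    Int.toNat_natCast]
  rw [show (List.replicate emergency.length (0 : Int)) = emergency.map (fun _ => (0 : Int)) from
      (List.map_const' (l := emergency)).symm]
  rw [both_folds emergency (PySem.List.enumerate em 0) (fun _ => 0) PySem.Dict.empty
      (fun x => PySem.Dict.getD_empty x 0)]
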